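-- pv_equiv track=rewrite | github.com/w1gglyw0bbly/Random-Stuff | CS112Spring2022/Project 3/rdeangel_242_PA3.py | how_many_uruks
-- ===== SOURCE A (Python) =====
-- def how_many_uruks(strength_values, init_fund_needed):
--     totalUruks = 0
--     budget = 0
--     #Finding the total budget from the strength_values
--     for x in strength_values:
--         if x == 0:
--             continue
--         elif x % 2 != 0:
--             budget += x
--         else:
--             budget *= x
--
--     #Finding totalUruks while the budget is available to buy them
--     while init_fund_needed < budget:
--         totalUruks += 1
--         budget -= init_fund_needed
--         init_fund_needed += 1
--
--     return totalUruks
-- ===== SOURCE B (Python) =====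
-- def how_many_uruks(strength_values, init_fund_needed):
--     budget = 0
--     for x in strength_values:
--         if x == 0:
--             continue
--         elif x % 2 != 0:
--             budget += x
--         else:
--             budget *= x
--
--     f = init_fund_needed
--     # After k purchases the loop's continue test "fund < budget" reads
--     # f + k < budget - (k*f + k*(k-1)//2), i.e. h(k) < budget with
--     def h(k):
--         return f * (k + 1) + k * (k + 1) // 2
--     # answer = least k >= 0 with h(k) >= budget; h is convex, so once past 0
--     # the affordable region is an initial segment -> exponential + binary search.
--     if h(0) >= budget:
--         return 0
--     hi = 1
--     while h(hi) < budget: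
--         hi *= 2
--     lo = 0
--     while hi - lo > 1:
--         mid = (lo + hi) // 2
--         if h(mid) < budget:
--             lo = mid
--         else:
--             hi = mid
--     return hi
-- ===== Notes on version B (the rewrite author's own statement) =====
-- stated objective: alternative
-- what changed: A buys uruks one at a time in a while loop; B expresses the cumulative cost after k purchases as a convex closed-form h(k) and finds the least unaffordable k by exponential doubling plus binary search.
import Mathlib
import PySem

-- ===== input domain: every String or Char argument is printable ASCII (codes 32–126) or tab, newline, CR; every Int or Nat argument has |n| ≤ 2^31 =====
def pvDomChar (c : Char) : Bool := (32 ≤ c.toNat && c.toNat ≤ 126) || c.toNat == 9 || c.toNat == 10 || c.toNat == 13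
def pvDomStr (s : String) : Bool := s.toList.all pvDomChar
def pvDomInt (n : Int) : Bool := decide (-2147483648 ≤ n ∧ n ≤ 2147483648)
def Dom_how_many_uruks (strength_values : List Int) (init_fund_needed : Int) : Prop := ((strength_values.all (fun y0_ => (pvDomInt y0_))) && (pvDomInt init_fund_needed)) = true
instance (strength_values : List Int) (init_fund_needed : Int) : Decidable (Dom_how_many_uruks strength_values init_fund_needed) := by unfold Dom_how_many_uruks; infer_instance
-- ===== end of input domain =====

-- B replaces A's one-purchase-at-a-time while loop by an exponential-plus-binary
-- search for the least unaffordable count of the convex cost function (objective: alternative).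

-- ===== PORT A =====
-- budget fold shared verbatim by Source A and Source B (both compute it with the identical loop)
def pvBudget (strength_values : List Int) : Int :=
  strength_values.foldl (fun budget x =>
    if x = 0 then budget
    else if PySem.Int.mod x 2 ≠ 0 then budget + x
    else budget * x) 0

def pvLoopA (totalUruks budget init_fund_needed : Int) : Int :=
  if init_fund_needed < budget then
    pvLoopA (totalUruks + 1) (budget - init_fund_needed) (init_fund_needed + 1)
  else totalUruks
termination_by ((-init_fund_needed).toNat, (budget - init_fund_needed).toNat)
decreasing_by
  rcases lt_or_ge init_fund_needed 0 with hneg | hpos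
  · exact Prod.Lex.left _ _ (by omega)
  · have e1 : (-(init_fund_needed + 1)).toNat = (-init_fund_needed).toNat := by omega
    rw [e1]
    exact Prod.Lex.right _ (by omega)

def how_many_uruks (strength_values : List Int) (init_fund_needed : Int) : Int :=
  pvLoopA 0 (pvBudget strength_values) init_fund_needed

-- ===== PORT B =====
-- h(k) of Source B: cost measure after k purchases; loop continues iff h(k) < budget
def pvH (f k : Int) : Int := f * (k + 1) + PySem.Int.floordiv (k * (k + 1)) 2

-- k*(k+1) is even, so the Python floor division in pvH is exact
theorem pvH_fd2 (k : Int) : PySem.Int.floordiv (k * (k + 1)) 2 * 2 = k * (k + 1) := by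
  obtain ⟨m, hm⟩ := Int.even_mul_succ_self k
  rw [PySem.Int.floordiv_eq_ediv_of_pos (by norm_num)]
  omega

-- for the termination of pvGrow: beyond 2(|f|+|budget|)+2 the cost is at least the budget
theorem pvH_big (f budget hi : Int) (h1 : 1 ≤ hi)
    (hbig : 2 * (f.natAbs + budget.natAbs : Int) + 2 ≤ hi) : budget ≤ pvH f hi := by
  have hfd := pvH_fd2 hi
  have h2 : 2 * budget + 2 ≤ 2 * f + hi := by omega
  have h4 : 2 * f + hi ≤ (hi + 1) * (2 * f + hi) :=
    le_mul_of_one_le_left (by omega) (by omega)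
  have h5 : (hi + 1) * (2 * f + hi) = 2 * (f * (hi + 1)) + hi * (hi + 1) := by ring
  unfold pvH
  linarith

-- Source B's doubling loop: while h(hi) < budget: hi *= 2   (guard 1 ≤ hi is for totality only;
-- the sole call passes hi = 1 and the guard then holds on every iteration)
def pvGrow (f budget hi : Int) : Int :=
  if 1 ≤ hi then
    if pvH f hi < budget then pvGrow f budget (hi * 2) else hi
  else hi
termination_by (2 * (f.natAbs + budget.natAbs) + 2 - hi.toNat)
decreasing_by
  have hlt : hi < 2 * ((f.natAbs : Int) + (budget.natAbs : Int)) + 2 := by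
    by_contra hge
    exact absurd (pvH_big f budget hi (by omega) (by omega)) (by omega)
  omega

-- Source B's binary-search loop: while hi - lo > 1: …
def pvBsearch (f budget lo hi : Int) : Int :=
  if 1 < hi - lo then
    let mid := PySem.Int.floordiv (lo + hi) 2
    if pvH f mid < budget then pvBsearch f budget mid hi else pvBsearch f budget lo mid
  else hi
termination_by (hi - lo).toNat
decreasing_by
  · have := PySem.Int.floordiv_eq_ediv_of_pos (a := lo + hi) (b := 2) (by norm_num)
    omega
  · have := PySem.Int.floordiv_eq_ediv_of_pos (a := lo + hi) (b := 2) (by norm_num)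
    omega

def how_many_uruks_alt (strength_values : List Int) (init_fund_needed : Int) : Int :=
  let budget := pvBudget strength_values
  let f := init_fund_needed
  if budget ≤ pvH f 0 then 0
  else pvBsearch f budget 0 (pvGrow f budget 1)

-- ===== PRECONDITION & SPEC =====
def Spec_how_many_uruks (strength_values : List Int) (init_fund_needed : Int) (out : Int) : Prop := out = how_many_uruks_alt strength_values init_fund_needed
instance (strength_values : List Int) (init_fund_needed : Int) (out : Int) : Decidable (Spec_how_many_uruks strength_values init_fund_needed out) := by unfold Spec_how_many_uruks; infer_instance

-- ===== CLAIM (what is proved, stated in full; the proofs are below) =====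
def Claim_equal_how_many_uruks : Prop := ∀ (strength_values : List Int) (init_fund_needed : Int), Dom_how_many_uruks strength_values init_fund_needed → Spec_how_many_uruks strength_values init_fund_needed (how_many_uruks strength_values init_fund_needed)

-- ===== LEMMAS AND PROOFS =====

-- twice the "remaining margin is gone" function: the loop of A continues at step k iff HH f b k < 0
def pvHH (f b k : Int) : Int := 2 * f * (k + 1) + k * (k + 1) - 2 * b

theorem pvHH_shift (f b j : Int) : pvHH f b (j + 1) = pvHH (f + 1) (b - f) j := by
  unfold pvHH; ring

theorem pvH_iff (f b k : Int) : (pvH f k < b ↔ pvHH f b k < 0) ∧ (b ≤ pvH f k ↔ 0 ≤ pvHH f b k) := by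
  have := pvH_fd2 k
  have h2 : 2 * (f * (k + 1)) = 2 * f * (k + 1) := by ring
  unfold pvH pvHH
  omega

-- characterisation of A's while loop: it returns t + (least k ≥ 0 with 0 ≤ pvHH f b k)
theorem pvLoopA_char (t b f : Int) :
    t ≤ pvLoopA t b f ∧ 0 ≤ pvHH f b (pvLoopA t b f - t) ∧
      ∀ j : Int, 0 ≤ j → j < pvLoopA t b f - t → pvHH f b j < 0 := by
  induction t, b, f using pvLoopA.induct with
  | case1 t b f hlt ih =>
    obtain ⟨ih1, ih2, ih3⟩ := ih
    rw [pvLoopA, if_pos hlt]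
    refine ⟨by omega, ?_, ?_⟩
    · have : pvLoopA (t + 1) (b - f) (f + 1) - t = (pvLoopA (t + 1) (b - f) (f + 1) - (t + 1)) + 1 := by omega
      rw [this, pvHH_shift]; exact ih2
    · intro j hj0 hjlt
      rcases eq_or_lt_of_le hj0 with h0 | h0
      · simp only [← h0]
        unfold pvHH; omega
      · have : j = (j - 1) + 1 := by omega
        rw [this, pvHH_shift]
        exact ih3 (j - 1) (by omega) (by omega)
  | case2 t b f hlt =>
    rw [pvLoopA, if_neg hlt]
    refine ⟨le_refl t, ?_, by omega⟩
    simp only [sub_self]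
    unfold pvHH; omega

-- convexity of pvHH in k: once the cost reaches the budget it stays there (given it starts below)
theorem pvHH_convex (f b j k : Int) (hj : 0 ≤ j) (hjk : j ≤ k)
    (h0 : pvHH f b 0 < 0) (hat : 0 ≤ pvHH f b j) : 0 ≤ pvHH f b k := by
  unfold pvHH at *
  rcases le_or_gt 0 (2 * f + k + j + 1) with hc | hc
  · nlinarith
  · nlinarith

theorem pvGrow_char (f b hi : Int) (h1 : 1 ≤ hi) :
    1 ≤ pvGrow f b hi ∧ b ≤ pvH f (pvGrow f b hi) := by
  induction hi using pvGrow.induct f b with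
  | case1 hi hpos hlt ih => rw [pvGrow, if_pos hpos, if_pos hlt]; exact ih (by omega)
  | case2 hi hpos hlt => rw [pvGrow, if_pos hpos, if_neg hlt]; exact ⟨hpos, by omega⟩
  | case3 hi hpos => omega

theorem pvBsearch_eq_pos (f b lo hi : Int) (h : 1 < hi - lo) :
    pvBsearch f b lo hi =
      if pvH f (PySem.Int.floordiv (lo + hi) 2) < b then
        pvBsearch f b (PySem.Int.floordiv (lo + hi) 2) hi
      else pvBsearch f b lo (PySem.Int.floordiv (lo + hi) 2) := by
  rw [pvBsearch, if_pos h]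

theorem pvBsearch_gap (n : Nat) (f b lo hi : Int) (hn : (hi - lo).toNat = n)
    (hlo : 0 ≤ lo) (hlh : lo < hi) (hL : pvH f lo < b) (hH : b ≤ pvH f hi) :
    1 ≤ pvBsearch f b lo hi ∧ b ≤ pvH f (pvBsearch f b lo hi) ∧
      pvH f (pvBsearch f b lo hi - 1) < b := by
  induction n using Nat.strong_induction_on generalizing lo hi with
  | _ n ih =>
    by_cases hgap : 1 < hi - lo
    · have hb := PySem.Int.floordiv_eq_ediv_of_pos (a := lo + hi) (b := 2) (by norm_num)
      rw [pvBsearch_eq_pos f b lo hi hgap]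
      by_cases hmid : pvH f (PySem.Int.floordiv (lo + hi) 2) < b
      · rw [if_pos hmid]
        exact ih (hi - PySem.Int.floordiv (lo + hi) 2).toNat (by omega) _ _ rfl
          (by omega) (by omega) hmid hH
      · rw [if_neg hmid]
        exact ih (PySem.Int.floordiv (lo + hi) 2 - lo).toNat (by omega) _ _ rfl
          hlo (by omega) hL (by omega)
    · rw [pvBsearch, if_neg hgap]
      have he : hi - 1 = lo := by omega
      rw [he]
      exact ⟨by omega, hH, hL⟩

-- two numbers that are both "the least k ≥ 0 with 0 ≤ pvHH f b k" are equal
theorem pvLeast_unique (f b kA kB : Int) (hA0 : 0 ≤ kA) (hB0 : 0 ≤ kB)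
    (hA : 0 ≤ pvHH f b kA) (hAlt : ∀ j : Int, 0 ≤ j → j < kA → pvHH f b j < 0)
    (hB : 0 ≤ pvHH f b kB) (hBlt : ∀ j : Int, 0 ≤ j → j < kB → pvHH f b j < 0) : kA = kB := by
  rcases lt_trichotomy kA kB with h | h | h
  · exact absurd hA (by simpa using hBlt kA hA0 h)
  · exact h
  · exact absurd hB (by simpa using hAlt kB hB0 h)

-- ===== VERDICT (by name: the statement is the Claim_ definition above) =====
theorem how_many_uruks_spec : Claim_equal_how_many_uruks := by
  intro sv f _
  unfold Spec_how_many_uruks how_many_uruks how_many_uruks_alt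
  set b := pvBudget sv with hb
  obtain ⟨hA0, hAat, hAlt⟩ := pvLoopA_char 0 b f
  simp only [sub_zero] at hAat hAlt
  by_cases h0 : b ≤ pvH f 0
  · rw [if_pos h0]
    have hH0 : 0 ≤ pvHH f b 0 := ((pvH_iff f b 0).2).mp h0
    by_contra hne
    exact absurd hH0 (by simpa using hAlt 0 le_rfl (by omega))
  · rw [if_neg h0]
    have hH0 : pvHH f b 0 < 0 := ((pvH_iff f b 0).1).mp (by omega)
    obtain ⟨hg1, hg2⟩ := pvGrow_char f b 1 le_rfl
    obtain ⟨hr1, hr2, hr3⟩ := pvBsearch_gap _ f b 0 (pvGrow f b 1) rfl le_rfl (by omega) (by omega) hg2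
    set r := pvBsearch f b 0 (pvGrow f b 1) with hrdef
    have hrH : 0 ≤ pvHH f b r := ((pvH_iff f b r).2).mp hr2
    have hrlt : ∀ j : Int, 0 ≤ j → j < r → pvHH f b j < 0 := by
      intro j hj0 hjr
      by_contra hjge
      have := pvHH_convex f b j (r - 1) hj0 (by omega) hH0 (by omega)
      exact absurd this (by simpa using ((pvH_iff f b (r - 1)).1).mp hr3)
    exact pvLeast_unique f b (pvLoopA 0 b f) r hA0 (by omega) hAat hAlt hrH hrlt
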